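-- pv_equiv track=rewrite | github.com/cestpasphoto/alpha-zero-general | akropolis/AkropolisPlayers.py | _compute_all
-- ===== SOURCE A (Python) =====
-- from copy import deepcopy
--
-- def _compute_level_pyramid(leftest_hex, n_tiles):
--     r0, q0 = leftest_hex
--     tiles = []
--     for i in range(n_tiles):
--         if r0 % 2 == 0:
--             tile = {(r0, q0), (r0-1, q0), (r0, q0+1)}
--             r0, q0 = r0-1, q0+1
--         else:
--             tile = {(r0, q0), (r0+1, q0+1), (r0, q0+1)}
--             r0, q0 = r0+1, q0+2
--         tiles.append(tile)
--     return tiles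
--
-- def _compute_all(all_universes, current_universe, current_sc_idx, leftest_hex, n_tiles):
--     # Add new level to current universe
--     universe_copy = deepcopy(current_universe)
--     new_level = _compute_level_pyramid(leftest_hex, n_tiles)
--     universe_copy.append(new_level)
--
--     if n_tiles <= 1:
--         all_universes[current_sc_idx] = universe_copy
--         return all_universes, current_sc_idx+1
--
--     # Recurrence for upper level
--     r, q = leftest_hex
--     if r % 2 == 0:
--         next_leftest_hexes = [(r-1, q), (r, q+1)]
--     else:
--         next_leftest_hexes = [(r+1, q+1), (r, q+1)]
--     for next_leftest_hex in next_leftest_hexes: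
--         all_universes, current_sc_idx = _compute_all(all_universes, universe_copy, current_sc_idx, next_leftest_hex, n_tiles-1)
--
--     return all_universes, current_sc_idx
-- ===== SOURCE B (Python) =====
-- from copy import deepcopy
--
-- def _compute_level_pyramid(leftest_hex, n_tiles):
--     r0, q0 = leftest_hex
--     tiles = []
--     for i in range(n_tiles):
--         if r0 % 2 == 0:
--             tile = {(r0, q0), (r0-1, q0), (r0, q0+1)}
--             r0, q0 = r0-1, q0+1
--         else:
--             tile = {(r0, q0), (r0+1, q0+1), (r0, q0+1)}
--             r0, q0 = r0+1, q0+2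
--         tiles.append(tile)
--     return tiles
--
-- def _compute_all(all_universes, current_universe, current_sc_idx, leftest_hex, n_tiles):
--     # Flat enumeration: each of the 2**(n_tiles-1) leaves is decoded from its index
--     # (first branch choice = most significant bit, 0 = first next-leftest hex).
--     depth = max(n_tiles - 1, 0)
--     count = 1 << depth
--     for i in range(count):
--         universe = deepcopy(current_universe)
--         hexv, k = leftest_hex, n_tiles
--         for j in range(depth + 1):
--             universe.append(_compute_level_pyramid(hexv, k))
--             if j < depth:
--                 universe = deepcopy(universe)  # fresh copy per level: no tile object is shared between levels
--                 bit = (i >> (depth - 1 - j)) & 1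
--                 r, q = hexv
--                 if r % 2 == 0:
--                     hexv = (r - 1, q) if bit == 0 else (r, q + 1)
--                 else:
--                     hexv = (r + 1, q + 1) if bit == 0 else (r, q + 1)
--                 k -= 1
--         all_universes[current_sc_idx + i] = universe
--     return all_universes, current_sc_idx + count
-- ===== Notes on version B (the rewrite author's own statement) =====
-- stated objective: alternative
-- what changed: The two-way DFS recursion is replaced by a flat loop over all 2**(n_tiles-1) leaf indices, decoding each index's bits (MSB = first branch, 0 = first next-leftest hex) and walking the leftest-hex recurrence once per leaf instead of recursing and deep-copying at every internal node.
import Mathlib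
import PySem

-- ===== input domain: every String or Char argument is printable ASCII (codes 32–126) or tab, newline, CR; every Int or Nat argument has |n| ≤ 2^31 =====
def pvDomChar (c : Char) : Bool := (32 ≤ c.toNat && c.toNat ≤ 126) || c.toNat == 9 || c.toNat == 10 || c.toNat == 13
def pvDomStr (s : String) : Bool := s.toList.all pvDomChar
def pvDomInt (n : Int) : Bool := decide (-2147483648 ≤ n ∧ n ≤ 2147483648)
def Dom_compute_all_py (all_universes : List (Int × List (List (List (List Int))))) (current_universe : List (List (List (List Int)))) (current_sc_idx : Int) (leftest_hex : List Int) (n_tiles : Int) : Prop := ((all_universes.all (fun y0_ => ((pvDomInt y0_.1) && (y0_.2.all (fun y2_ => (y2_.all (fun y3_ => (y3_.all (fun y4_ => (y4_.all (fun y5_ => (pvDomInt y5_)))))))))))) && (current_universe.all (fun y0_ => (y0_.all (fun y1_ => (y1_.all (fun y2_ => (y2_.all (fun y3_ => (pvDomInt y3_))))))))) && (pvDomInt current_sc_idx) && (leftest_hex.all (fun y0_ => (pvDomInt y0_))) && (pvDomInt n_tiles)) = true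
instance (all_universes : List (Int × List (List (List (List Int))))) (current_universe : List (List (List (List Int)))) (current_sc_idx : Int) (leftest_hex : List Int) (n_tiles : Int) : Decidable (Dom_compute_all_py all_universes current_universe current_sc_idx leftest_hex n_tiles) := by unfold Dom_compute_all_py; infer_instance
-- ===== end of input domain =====

-- B replaces A's two-way DFS recursion by a flat loop over leaf indices (bit-decoded paths); equivalence of the return values.

-- ===== PORT A =====
-- shared module helper _compute_level_pyramid: loop state (r0, q0), one recursion step per tile
def pvLevelGo (k : Nat) (r0 q0 : Int) : List (List (List Int)) :=
  match k with
  | 0 => []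
  | k + 1 =>
    if PySem.Int.mod r0 2 == 0 then
      PySem.Set.ofList [[r0, q0], [r0 - 1, q0], [r0, q0 + 1]] :: pvLevelGo k (r0 - 1) (q0 + 1)
    else
      PySem.Set.ofList [[r0, q0], [r0 + 1, q0 + 1], [r0, q0 + 1]] :: pvLevelGo k (r0 + 1) (q0 + 2)

-- 'r0, q0 = leftest_hex' raises unless the tuple has 2 items; Pre_ excludes that, getD values are junk there
def pvLevelPyramid (leftest_hex : List Int) (n_tiles : Int) : List (List (List Int)) :=
  pvLevelGo n_tiles.toNat (leftest_hex.getD 0 0) (leftest_hex.getD 1 0)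

-- 'all_universes[current_sc_idx] = universe_copy' on the dict
def pvDinsert (au : List (Int × List (List (List (List Int))))) (k : Int) (v : List (List (List (List Int)))) : List (Int × List (List (List (List Int)))) :=
  (PySem.Dict.insert (PySem.Dict.mk au) k v).items

-- A's recursion, with fuel n_tiles.toNat (sufficient: each call decreases n_tiles, stopping at n_tiles ≤ 1)
def pvCARec (fuel : Nat) (au : List (Int × List (List (List (List Int))))) (cu : List (List (List (List Int)))) (idx : Int) (lh : List Int) (n : Int) : (List (Int × List (List (List (List Int))))) × Int :=
  let uc := cu ++ [pvLevelPyramid lh n]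
  if n ≤ 1 then (pvDinsert au idx uc, idx + 1)
  else
    match fuel with
    | 0 => (au, idx)  -- unreachable: fuel ≥ (n-1).toNat at every call
    | f + 1 =>
      let r := lh.getD 0 0
      let q := lh.getD 1 0
      let nexts : List (List Int) :=
        if PySem.Int.mod r 2 == 0 then [[r - 1, q], [r, q + 1]] else [[r + 1, q + 1], [r, q + 1]]
      nexts.foldl (fun st nh => pvCARec f st.1 uc st.2 nh (n - 1)) (au, idx)

def compute_all_py (all_universes : List (Int × List (List (List (List Int))))) (current_universe : List (List (List (List Int)))) (current_sc_idx : Int) (leftest_hex : List Int) (n_tiles : Int) : (List (Int × List (List (List (List Int))))) × Int :=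
  pvCARec n_tiles.toNat all_universes current_universe current_sc_idx leftest_hex n_tiles

-- ===== PORT B =====
-- inner loop of B: the levels appended for leaf index i, decoding one bit per step (MSB first)
def pvLeafLevels (lh : List Int) (n : Int) (d : Nat) (i : Nat) : List (List (List (List Int))) :=
  match d with
  | 0 => [pvLevelPyramid lh n]
  | d' + 1 =>
    let bit := (i >>> d') % 2
    let r := lh.getD 0 0
    let q := lh.getD 1 0
    let nh : List Int :=
      if PySem.Int.mod r 2 == 0 then (if bit == 0 then [r - 1, q] else [r, q + 1])
      else (if bit == 0 then [r + 1, q + 1] else [r, q + 1])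
    pvLevelPyramid lh n :: pvLeafLevels nh (n - 1) d' i

def compute_all_py_alt (all_universes : List (Int × List (List (List (List Int))))) (current_universe : List (List (List (List Int)))) (current_sc_idx : Int) (leftest_hex : List Int) (n_tiles : Int) : (List (Int × List (List (List (List Int))))) × Int :=
  let d : Nat := (max (n_tiles - 1) 0).toNat
  let au' := (List.range (2 ^ d)).foldl
    (fun au (i : Nat) => pvDinsert au (current_sc_idx + (i : Int)) (current_universe ++ pvLeafLevels leftest_hex n_tiles d i)) all_universes
  (au', current_sc_idx + ((2 ^ d : Nat) : Int))

-- ===== PRECONDITION & SPEC =====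
-- Pre_ excludes only inputs where the Python A raises: 'r0, q0 = leftest_hex' needs exactly two components.
def Pre_compute_all_py (all_universes : List (Int × List (List (List (List Int))))) (current_universe : List (List (List (List Int)))) (current_sc_idx : Int) (leftest_hex : List Int) (n_tiles : Int) : Prop :=
  leftest_hex.length = 2
instance (all_universes : List (Int × List (List (List (List Int))))) (current_universe : List (List (List (List Int)))) (current_sc_idx : Int) (leftest_hex : List Int) (n_tiles : Int) : Decidable (Pre_compute_all_py all_universes current_universe current_sc_idx leftest_hex n_tiles) := by unfold Pre_compute_all_py; infer_instance

def pvWitness_compute_all_py : (List (Int × List (List (List (List Int))))) × List (List (List (List Int))) × Int × List Int × Int :=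
  ([], [], 0, [0, 1], 2)

def Spec_compute_all_py (all_universes : List (Int × List (List (List (List Int))))) (current_universe : List (List (List (List Int)))) (current_sc_idx : Int) (leftest_hex : List Int) (n_tiles : Int) (out : (List (Int × List (List (List (List Int))))) × Int) : Prop := out = compute_all_py_alt all_universes current_universe current_sc_idx leftest_hex n_tiles
instance (all_universes : List (Int × List (List (List (List Int))))) (current_universe : List (List (List (List Int)))) (current_sc_idx : Int) (leftest_hex : List Int) (n_tiles : Int) (out : (List (Int × List (List (List (List Int))))) × Int) : Decidable (Spec_compute_all_py all_universes current_universe current_sc_idx leftest_hex n_tiles out) := by unfold Spec_compute_all_py; infer_instance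

-- ===== CLAIM (what is proved, stated in full; the proofs are below) =====
def Claim_equal_compute_all_py : Prop := ∀ (all_universes : List (Int × List (List (List (List Int))))) (current_universe : List (List (List (List Int)))) (current_sc_idx : Int) (leftest_hex : List Int) (n_tiles : Int), Dom_compute_all_py all_universes current_universe current_sc_idx leftest_hex n_tiles → Pre_compute_all_py all_universes current_universe current_sc_idx leftest_hex n_tiles → Spec_compute_all_py all_universes current_universe current_sc_idx leftest_hex n_tiles (compute_all_py all_universes current_universe current_sc_idx leftest_hex n_tiles)

-- ===== LEMMAS AND PROOFS =====

-- leaf decoding uses only the low d bits of the index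
theorem pvLeafLevels_high_bits (d : Nat) : ∀ (lh : List Int) (n : Int) (i c : Nat),
    pvLeafLevels lh n d (i + 2 ^ d * c) = pvLeafLevels lh n d i := by
  induction d with
  | zero => intro lh n i c; rfl
  | succ d' ih =>
    intro lh n i c
    have hdiv : (i + 2 ^ (d' + 1) * c) >>> d' = i >>> d' + 2 * c := by
      simp only [Nat.shiftRight_eq_div_pow]
      have h2 : 2 ^ (d' + 1) * c = 2 ^ d' * (2 * c) := by ring
      rw [h2, Nat.add_mul_div_left _ _ (Nat.two_pow_pos d')]
    have hbit : (i + 2 ^ (d' + 1) * c) >>> d' % 2 = i >>> d' % 2 := by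
      rw [hdiv, Nat.add_mul_mod_self_left]
    have harg : i + 2 ^ (d' + 1) * c = i + 2 ^ d' * (2 * c) := by ring
    simp only [pvLeafLevels]
    rw [hbit, harg, ih]

theorem pvMain (d : Nat) : ∀ (fuel : Nat) (au : List (Int × List (List (List (List Int))))) (cu : List (List (List (List Int)))) (idx : Int) (lh : List Int) (n : Int),
    (n - 1).toNat = d → d ≤ fuel →
    pvCARec fuel au cu idx lh n =
      ((List.range (2 ^ d)).foldl (fun au (i : Nat) => pvDinsert au (idx + (i : Int)) (cu ++ pvLeafLevels lh n d i)) au,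
       idx + ((2 ^ d : Nat) : Int)) := by
  induction d with
  | zero =>
    intro fuel au cu idx lh n hd _
    have hn : n ≤ 1 := by omega
    rw [pvCARec.eq_def]
    simp [hn, pvLeafLevels]
  | succ d' ih =>
    intro fuel au cu idx lh n hd hfuel
    have hn : ¬ n ≤ 1 := by omega
    have hd' : (n - 1 - 1).toNat = d' := by omega
    obtain ⟨f, rfl⟩ : ∃ f, fuel = f + 1 := ⟨fuel - 1, by omega⟩
    have hf : d' ≤ f := by omega
    rw [pvCARec]
    simp only [if_neg hn]
    have hleaf0 : ∀ i : Nat, i < 2 ^ d' → pvLeafLevels lh n (d' + 1) i =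
        pvLevelPyramid lh n :: pvLeafLevels (if PySem.Int.mod (lh.getD 0 0) 2 == 0 then [lh.getD 0 0 - 1, lh.getD 1 0] else [lh.getD 0 0 + 1, lh.getD 1 0 + 1]) (n - 1) d' i := by
      intro i hi
      have hbit : i >>> d' = 0 := by
        simp only [Nat.shiftRight_eq_div_pow]; exact Nat.div_eq_of_lt hi
      simp [pvLeafLevels, hbit]
    have hleaf1 : ∀ i : Nat, i < 2 ^ d' → pvLeafLevels lh n (d' + 1) (2 ^ d' + i) =
        pvLevelPyramid lh n :: pvLeafLevels [lh.getD 0 0, lh.getD 1 0 + 1] (n - 1) d' i := by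
      intro i hi
      have hbit : (2 ^ d' + i) >>> d' = 1 := by
        simp only [Nat.shiftRight_eq_div_pow]
        rw [Nat.add_comm, Nat.add_div_right _ (Nat.two_pow_pos d'), Nat.div_eq_of_lt hi]
      have hlow : ∀ nh : List Int, pvLeafLevels nh (n - 1) d' (2 ^ d' + i) = pvLeafLevels nh (n - 1) d' i := by
        intro nh
        have h2 : 2 ^ d' + i = i + 2 ^ d' * 1 := by ring
        rw [h2, pvLeafLevels_high_bits]
      simp [pvLeafLevels, hbit, hlow]
    have hnexts : (if PySem.Int.mod (lh.getD 0 0) 2 == 0 then ([[lh.getD 0 0 - 1, lh.getD 1 0], [lh.getD 0 0, lh.getD 1 0 + 1]] : List (List Int)) else [[lh.getD 0 0 + 1, lh.getD 1 0 + 1], [lh.getD 0 0, lh.getD 1 0 + 1]]) =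
        [(if PySem.Int.mod (lh.getD 0 0) 2 == 0 then [lh.getD 0 0 - 1, lh.getD 1 0] else [lh.getD 0 0 + 1, lh.getD 1 0 + 1]), [lh.getD 0 0, lh.getD 1 0 + 1]] := by
      by_cases hpar : (PySem.Int.mod (lh.getD 0 0) 2 == 0) = true
      · rw [if_pos hpar, if_pos hpar]
      · rw [if_neg hpar, if_neg hpar]
    rw [hnexts]
    simp only [List.foldl_cons, List.foldl_nil]
    rw [ih f au (cu ++ [pvLevelPyramid lh n]) idx _ (n - 1) hd' hf]
    dsimp only
    rw [ih f _ (cu ++ [pvLevelPyramid lh n]) (idx + ((2 ^ d' : Nat) : Int)) _ (n - 1) hd' hf]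
    have hpow : 2 ^ (d' + 1) = 2 ^ d' + 2 ^ d' := by ring
    rw [hpow, List.range_add, List.foldl_append, List.foldl_map]
    congr 1
    · have e1 : List.foldl (fun au (i : Nat) => pvDinsert au (idx + (i : Int)) (cu ++ pvLeafLevels lh n (d' + 1) i)) au (List.range (2 ^ d')) =
          List.foldl (fun au (i : Nat) => pvDinsert au (idx + (i : Int)) ((cu ++ [pvLevelPyramid lh n]) ++ pvLeafLevels (if PySem.Int.mod (lh.getD 0 0) 2 == 0 then [lh.getD 0 0 - 1, lh.getD 1 0] else [lh.getD 0 0 + 1, lh.getD 1 0 + 1]) (n - 1) d' i)) au (List.range (2 ^ d')) := by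
        apply PySem.List.foldl_congr_mem
        intro acc x hx
        rw [hleaf0 x (List.mem_range.mp hx)]
        simp
      rw [e1]
      apply PySem.List.foldl_congr_mem
      intro acc x hx
      rw [hleaf1 x (List.mem_range.mp hx)]
      have hkey : idx + ((2 ^ d' + x : Nat) : Int) = idx + ((2 ^ d' : Nat) : Int) + (x : Int) := by
        push_cast; ring
      rw [hkey]
      simp
    · push_cast; ring

theorem compute_all_py_spec : Claim_equal_compute_all_py := by
  intro au cu idx lh n _ _
  unfold Spec_compute_all_py compute_all_py
  simp only [compute_all_py_alt]
  rw [pvMain ((max (n - 1) 0).toNat) n.toNat au cu idx lh n (by omega) (by omega)]
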